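-- pv_equiv track=rewrite | github.com/khai9xht/bros_vie | .ipynb_checkpoints/utils-checkpoint.py | parse_initial_words
-- ===== SOURCE A (Python) =====
-- def parse_initial_words(itc_label, box_first_token_mask, class_names):
--     itc_label_np = itc_label
--     box_first_token_mask_np = box_first_token_mask
--
--     outputs = [[] for _ in range(len(class_names))]
--     for token_idx, label in enumerate(itc_label_np):
--         if box_first_token_mask_np[token_idx] and label != 0:
--             outputs[label].append(token_idx)
--
--     return outputs
-- ===== SOURCE B (Python) =====
-- def parse_initial_words(itc_label, box_first_token_mask, class_names):
--     return [
--         [idx for idx, label in enumerate(itc_label)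
--          if box_first_token_mask[idx] and label != 0 and label == c]
--         for c in range(len(class_names))
--     ]
-- ===== Notes on version B (the rewrite author's own statement) =====
-- stated objective: alternative
-- what changed: A's single pass that dispatches each masked nonzero token index into outputs[label] is replaced by one independent filtering scan per class (a list comprehension per class id), with no mutable bucket table.
-- intended difference: On inputs with a masked nonzero negative label in range(-len(class_names), 0), A silently wraps via Python negative indexing and appends the token index to one of the last buckets, while B files a token only under the class equal to its label, which is the intended grouping by class id. — e.g. on parse_initial_words([-1], [true], ["x", "y"]): A returns [[], [0]], B returns [[], []]
import Mathlib
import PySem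

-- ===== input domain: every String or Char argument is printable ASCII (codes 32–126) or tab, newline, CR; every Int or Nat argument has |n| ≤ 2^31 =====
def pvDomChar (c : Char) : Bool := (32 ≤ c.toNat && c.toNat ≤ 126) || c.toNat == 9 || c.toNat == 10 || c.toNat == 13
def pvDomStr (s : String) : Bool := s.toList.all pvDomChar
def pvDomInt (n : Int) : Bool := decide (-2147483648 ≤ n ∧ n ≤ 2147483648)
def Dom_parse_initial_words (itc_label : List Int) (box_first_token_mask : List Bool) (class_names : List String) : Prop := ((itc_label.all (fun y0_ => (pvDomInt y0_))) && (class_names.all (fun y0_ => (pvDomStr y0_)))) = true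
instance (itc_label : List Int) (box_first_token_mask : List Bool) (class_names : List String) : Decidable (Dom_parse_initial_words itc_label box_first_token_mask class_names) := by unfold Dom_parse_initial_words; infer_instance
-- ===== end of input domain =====

-- B replaces A's single dispatching pass (append into outputs[label]) by one independent
-- filtering scan per class; objective: alternative decomposition, not speed.
-- A mutates nothing observable; equivalence is about the return value.

-- ===== PORT A =====
-- one loop step of A: if the mask bit is truthy and the label nonzero, append the token
-- index to outputs[label] (Python indexing: negative label wraps; out of range would raise,
-- the port then leaves the state — those inputs are outside Pre_)
def pvStepA (box_first_token_mask : List Bool) (outputs : List (List Int)) (p : Int × Int) : List (List Int) :=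
  if ((PySem.List.pyGet? box_first_token_mask p.1).getD false && p.2 != 0) then
    PySem.List.pySetD outputs p.2 ((PySem.List.pyGetD outputs p.2 []) ++ [p.1])
  else outputs

def parse_initial_words (itc_label : List Int) (box_first_token_mask : List Bool) (class_names : List String) : List (List Int) :=
  (PySem.List.enumerate itc_label 0).foldl (pvStepA box_first_token_mask)
    (class_names.map (fun _ => ([] : List Int)))

-- ===== PORT B =====
def parse_initial_words_alt (itc_label : List Int) (box_first_token_mask : List Bool) (class_names : List String) : List (List Int) :=
  (PySem.List.pyRange 0 (class_names.length : Int) 1).map (fun c =>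
    (PySem.List.enumerate itc_label 0).filterMap (fun p =>
      if ((PySem.List.pyGet? box_first_token_mask p.1).getD false && p.2 != 0 && p.2 == c)
      then some p.1 else none))

-- ===== PRECONDITION & SPEC =====
-- Pre_ excludes exactly the inputs on which the Python A raises: a mask shorter than the
-- label list (IndexError on box_first_token_mask[token_idx]) or a masked nonzero label
-- outside range(-len(class_names), len(class_names)) (IndexError on outputs[label]).
def Pre_parse_initial_words (itc_label : List Int) (box_first_token_mask : List Bool) (class_names : List String) : Prop :=
  itc_label.length ≤ box_first_token_mask.length ∧
  ∀ p ∈ PySem.List.enumerate itc_label 0,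
    ((PySem.List.pyGet? box_first_token_mask p.1).getD false && p.2 != 0) = true →
    -(class_names.length : Int) ≤ p.2 ∧ p.2 < (class_names.length : Int)
instance (itc_label : List Int) (box_first_token_mask : List Bool) (class_names : List String) : Decidable (Pre_parse_initial_words itc_label box_first_token_mask class_names) := by unfold Pre_parse_initial_words; infer_instance

def pvWitness_parse_initial_words : List Int × List Bool × List String := ([1, 0], [true, true], ["x", "y"])

-- On inputs with a masked nonzero NEGATIVE label in range(-len(class_names), 0), A silently
-- wraps (Python negative indexing) and appends the token index to one of the LAST buckets,
-- while B files a token only under the class equal to its label, which is the intended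
-- grouping of first-token indices by class id.
def D_parse_initial_words (itc_label : List Int) (box_first_token_mask : List Bool) (class_names : List String) : Prop :=
  ∃ p ∈ PySem.List.enumerate itc_label 0,
    ((PySem.List.pyGet? box_first_token_mask p.1).getD false) = true ∧
    p.2 < 0 ∧ -(class_names.length : Int) ≤ p.2
instance (itc_label : List Int) (box_first_token_mask : List Bool) (class_names : List String) : Decidable (D_parse_initial_words itc_label box_first_token_mask class_names) := by unfold D_parse_initial_words; infer_instance

def Spec_parse_initial_words (itc_label : List Int) (box_first_token_mask : List Bool) (class_names : List String) (out : List (List Int)) : Prop := ¬ D_parse_initial_words itc_label box_first_token_mask class_names → out = parse_initial_words_alt itc_label box_first_token_mask class_names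
instance (itc_label : List Int) (box_first_token_mask : List Bool) (class_names : List String) (out : List (List Int)) : Decidable (Spec_parse_initial_words itc_label box_first_token_mask class_names out) := by unfold Spec_parse_initial_words; infer_instance

def pvDiffWitness_parse_initial_words : List Int × List Bool × List String := ([-1], [true], ["x", "y"])
def pvDiffWitnessOut_parse_initial_words : (List (List Int)) × (List (List Int)) := ([[], [0]], [[], []])

-- ===== CLAIM (what is proved, stated in full; the proofs are below) =====
def Claim_unchanged_parse_initial_words : Prop := ∀ (itc_label : List Int) (box_first_token_mask : List Bool) (class_names : List String), Dom_parse_initial_words itc_label box_first_token_mask class_names → Pre_parse_initial_words itc_label box_first_token_mask class_names → Spec_parse_initial_words itc_label box_first_token_mask class_names (parse_initial_words itc_label box_first_token_mask class_names)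
def Claim_changed_parse_initial_words : Prop := Dom_parse_initial_words (pvDiffWitness_parse_initial_words.1) (pvDiffWitness_parse_initial_words.2.1) (pvDiffWitness_parse_initial_words.2.2) ∧ Pre_parse_initial_words (pvDiffWitness_parse_initial_words.1) (pvDiffWitness_parse_initial_words.2.1) (pvDiffWitness_parse_initial_words.2.2) ∧ D_parse_initial_words (pvDiffWitness_parse_initial_words.1) (pvDiffWitness_parse_initial_words.2.1) (pvDiffWitness_parse_initial_words.2.2) ∧ parse_initial_words (pvDiffWitness_parse_initial_words.1) (pvDiffWitness_parse_initial_words.2.1) (pvDiffWitness_parse_initial_words.2.2) = pvDiffWitnessOut_parse_initial_words.1 ∧ parse_initial_words_alt (pvDiffWitness_parse_initial_words.1) (pvDiffWitness_parse_initial_words.2.1) (pvDiffWitness_parse_initial_words.2.2) = pvDiffWitnessOut_parse_initial_words.2 ∧ pvDiffWitnessOut_parse_initial_words.1 ≠ pvDiffWitnessOut_parse_initial_words.2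

def Claim_exact_parse_initial_words : Prop := ∀ (itc_label : List Int) (box_first_token_mask : List Bool) (class_names : List String), Dom_parse_initial_words itc_label box_first_token_mask class_names → Pre_parse_initial_words itc_label box_first_token_mask class_names → D_parse_initial_words itc_label box_first_token_mask class_names → parse_initial_words itc_label box_first_token_mask class_names ≠ parse_initial_words_alt itc_label box_first_token_mask class_names

-- ===== LEMMAS AND PROOFS =====

-- the Python list index a label lab dispatches to in a bucket table of length n (wrapping once when negative)
def pvClass (n : Nat) (lab : Int) : Nat := if 0 ≤ lab then lab.toNat else n - (-lab).toNat

lemma pv_pyIdx_class (n : Nat) (lab : Int) (h1 : -(n:Int) ≤ lab) (h2 : lab < (n:Int)) :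
    PySem.List.pyIdx? n lab = some (pvClass n lab) := by
  unfold PySem.List.pyIdx? pvClass
  split_ifs with ha hb hc <;> simp_all <;> omega

lemma pv_class_lt (n : Nat) (lab : Int) (h1 : -(n:Int) ≤ lab) (h2 : lab < (n:Int)) (h3 : lab ≠ 0 ∨ 0 < n) :
    pvClass n lab < n := by
  unfold pvClass
  split_ifs with ha <;> omega

-- setting slot j of a range-indexed table keeps it range-indexed
lemma pv_set_map_range {α : Type} (n j : Nat) (g : Nat → α) (v : α) :
    ((List.range n).map g).set j v = (List.range n).map (fun c => if c = j then v else g c) := by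
  apply List.ext_getElem
  · simp
  · intro i h1 h2
    simp only [List.getElem_set, List.getElem_map, List.getElem_range]
    by_cases hij : i = j
    · simp [hij]
    · rw [if_neg (fun h => hij h.symm), if_neg hij]

-- A's fold over a range-indexed bucket table, when every dispatched label lies in [1, n),
-- appends per bucket exactly the indices B's per-class filter selects
lemma pv_fold_buckets (mask : List Bool) (n : Nat) (ps : List (Int × Int)) (g : Nat → List Int)
    (h : ∀ p ∈ ps, ((PySem.List.pyGet? mask p.1).getD false && p.2 != 0) = true →
          1 ≤ p.2 ∧ p.2 < (n : Int)) :
    ps.foldl (pvStepA mask) ((List.range n).map g)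
      = (List.range n).map (fun c => g c ++ ps.filterMap (fun p =>
          if ((PySem.List.pyGet? mask p.1).getD false && p.2 != 0 && p.2 == (c : Int))
          then some p.1 else none)) := by
  induction ps generalizing g with
  | nil => simp
  | cons p ps ih =>
    by_cases hg : ((PySem.List.pyGet? mask p.1).getD false && p.2 != 0) = true
    · obtain ⟨h1, h2⟩ := h p (List.mem_cons_self) hg
      have hnn : (0:Int) ≤ p.2 := by omega
      have hlen : p.2 < (((List.range n).map g).length : Int) := by simpa using h2
      have htn : p.2.toNat < n := by omega
      have hback : (p.2.toNat : Int) = p.2 := Int.toNat_of_nonneg hnn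
      have hget : PySem.List.pyGetD ((List.range n).map g) p.2 [] = g p.2.toNat := by
        rw [PySem.List.pyGetD_eq_getElem _ _ hnn hlen]
        simp
      have hstep : pvStepA mask ((List.range n).map g) p
          = (List.range n).map (fun c => if c = p.2.toNat then g p.2.toNat ++ [p.1] else g c) := by
        rw [pvStepA, if_pos hg, hget, PySem.List.pySetD_of_nonneg _ _ hnn,
          pv_set_map_range n p.2.toNat]
      rw [List.foldl_cons, hstep, ih _ (fun q hq => h q (List.mem_cons_of_mem _ hq))]
      apply List.map_congr_left
      intro c hc
      have hcn : c < n := List.mem_range.mp hc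
      by_cases hcp : c = p.2.toNat
      · subst hcp
        rw [List.filterMap_cons_some (b := p.1) (by simp [hg, hnn]),
          if_pos rfl, List.append_assoc, List.singleton_append]
      · rw [List.filterMap_cons_none (by
          have : ¬ p.2 = (c : Int) := by intro he; apply hcp; omega
          simp [this]), if_neg hcp]
    · have hstep : pvStepA mask ((List.range n).map g) p = (List.range n).map g := by
        rw [pvStepA, if_neg hg]
      rw [List.foldl_cons, hstep, ih _ (fun q hq => h q (List.mem_cons_of_mem _ hq))]
      apply List.map_congr_left
      intro c hc
      rw [Bool.not_eq_true] at hg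
      rw [List.filterMap_cons_none (by simp [hg])]

-- B written as a map over List.range
lemma pv_alt_eq (itc_label : List Int) (mask : List Bool) (names : List String) :
    parse_initial_words_alt itc_label mask names
      = (List.range names.length).map (fun (c : Nat) =>
          (PySem.List.enumerate itc_label 0).filterMap (fun p =>
            if ((PySem.List.pyGet? mask p.1).getD false && p.2 != 0 && p.2 == ((c : Nat) : Int))
            then some p.1 else none)) := by
  rw [parse_initial_words_alt, PySem.List.pyRange_zero_natCast, List.map_map]
  exact List.map_congr_left (fun c _ => rfl)

lemma pv_step_class (mask : List Bool) (n : Nat) (g : Nat → List Int) (p : Int × Int)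
    (hg : ((PySem.List.pyGet? mask p.1).getD false && p.2 != 0) = true)
    (h1 : -(n:Int) ≤ p.2) (h2 : p.2 < (n:Int)) :
    pvStepA mask ((List.range n).map g) p
      = (List.range n).map (fun c => if c = pvClass n p.2 then g (pvClass n p.2) ++ [p.1] else g c) := by
  have hne : p.2 ≠ 0 := by
    simp only [Bool.and_eq_true, bne_iff_ne, ne_eq] at hg; exact hg.2
  have hcl : pvClass n p.2 < n := pv_class_lt n p.2 h1 h2 (Or.inl hne)
  have hidx : PySem.List.pyIdx? ((List.range n).map g).length p.2 = some (pvClass n p.2) := by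
    simpa using pv_pyIdx_class n p.2 h1 h2
  have hget : PySem.List.pyGetD ((List.range n).map g) p.2 [] = g (pvClass n p.2) := by
    unfold PySem.List.pyGetD PySem.List.pyGet?
    rw [hidx]
    simp [hcl]
  have hset : PySem.List.pySetD ((List.range n).map g) p.2 (g (pvClass n p.2) ++ [p.1])
      = ((List.range n).map g).set (pvClass n p.2) (g (pvClass n p.2) ++ [p.1]) := by
    unfold PySem.List.pySetD PySem.List.pySet?
    rw [hidx]
    rfl
  rw [pvStepA, if_pos hg, hget, hset, pv_set_map_range n (pvClass n p.2)]

-- A's fold over a range-indexed bucket table, for arbitrary in-range labels: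
-- each dispatched index lands in the bucket pvClass n label
lemma pv_fold_buckets_gen (mask : List Bool) (n : Nat) (ps : List (Int × Int)) (g : Nat → List Int)
    (h : ∀ p ∈ ps, ((PySem.List.pyGet? mask p.1).getD false && p.2 != 0) = true →
          -(n:Int) ≤ p.2 ∧ p.2 < (n : Int)) :
    ps.foldl (pvStepA mask) ((List.range n).map g)
      = (List.range n).map (fun c => g c ++ ps.filterMap (fun p =>
          if ((PySem.List.pyGet? mask p.1).getD false && p.2 != 0 && (pvClass n p.2 == c))
          then some p.1 else none)) := by
  induction ps generalizing g with
  | nil => simp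
  | cons p ps ih =>
    by_cases hg : ((PySem.List.pyGet? mask p.1).getD false && p.2 != 0) = true
    · obtain ⟨h1, h2⟩ := h p (List.mem_cons_self) hg
      rw [List.foldl_cons, pv_step_class mask n g p hg h1 h2,
        ih _ (fun q hq => h q (List.mem_cons_of_mem _ hq))]
      apply List.map_congr_left
      intro c hc
      by_cases hcp : c = pvClass n p.2
      · subst hcp
        rw [List.filterMap_cons_some (b := p.1) (by simp [hg]),
          if_pos rfl, List.append_assoc, List.singleton_append]
      · rw [List.filterMap_cons_none (by
          have hne2 : pvClass n p.2 ≠ c := fun h => hcp h.symm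
          simp [hg, hne2]), if_neg hcp]
    · rw [Bool.not_eq_true] at hg
      have hstep : pvStepA mask ((List.range n).map g) p = (List.range n).map g := by
        rw [pvStepA, if_neg (by simp [hg])]
      rw [List.foldl_cons, hstep, ih _ (fun q hq => h q (List.mem_cons_of_mem _ hq))]
      apply List.map_congr_left
      intro c hc
      rw [List.filterMap_cons_none (by simp [hg])]

lemma pv_isSome_if {α : Type} (b : Bool) (x : α) : (if b then some x else none).isSome = b := by
  cases b <;> simp

-- a strictly larger count when the bigger predicate holds somewhere the smaller fails
lemma pv_countP_lt {α : Type} (P Q : α → Bool) (l : List α)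
    (hmono : ∀ a ∈ l, Q a = true → P a = true)
    (x : α) (hx : x ∈ l) (hP : P x = true) (hQ : Q x = false) :
    l.countP Q < l.countP P := by
  induction l with
  | nil => cases hx
  | cons a l ih =>
    rw [List.countP_cons, List.countP_cons]
    rcases List.mem_cons.mp hx with rfl | hx'
    · have : l.countP Q ≤ l.countP P :=
        List.countP_mono_left (fun b hb => hmono b (List.mem_cons_of_mem _ hb))
      simp [hP, hQ]; omega
    · have := ih (fun b hb => hmono b (List.mem_cons_of_mem _ hb)) hx'
      have hQP : ∀ (b : Bool), (if b then 1 else 0) ≤ (if b then 1 else 0) := fun _ => le_refl _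
      by_cases hqa : Q a = true
      · simp [hqa, hmono a (List.mem_cons_self) hqa]; omega
      · rw [Bool.not_eq_true] at hqa
        simp [hqa]
        cases hpa : P a <;> simp <;> omega


-- ===== VERDICT (by name: the statement is the Claim_ definition above) =====
theorem parse_initial_words_spec : Claim_unchanged_parse_initial_words := by
  intro itc mask names _ hpre hnd
  obtain ⟨_, hlab⟩ := hpre
  rw [parse_initial_words, pv_alt_eq]
  have hinit : names.map (fun _ => ([] : List Int))
      = (List.range names.length).map (fun _ => ([] : List Int)) := by
    apply List.ext_getElem <;> simp
  rw [hinit, pv_fold_buckets]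
  · simp
  · intro p hp hg
    obtain ⟨hlo, hhi⟩ := hlab p hp hg
    have hg' := hg
    simp only [Bool.and_eq_true] at hg'
    obtain ⟨hmask, hnz⟩ := hg'
    have hne : p.2 ≠ 0 := by simpa using hnz
    have hpos : ¬ p.2 < 0 := fun hneg => hnd ⟨p, hp, hmask, hneg, hlo⟩
    exact ⟨by omega, hhi⟩

theorem parse_initial_words_changed : Claim_changed_parse_initial_words := by
  unfold Claim_changed_parse_initial_words; decide

-- one step of A on a range-indexed table, for any in-range label (possibly negative)

theorem parse_initial_words_tight : Claim_exact_parse_initial_words := by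
  intro itc mask names _ hpre hd heq
  obtain ⟨_, hlab⟩ := hpre
  obtain ⟨p0, hp0, hmask0, hneg0, hlo0⟩ := hd
  have hg0 : ((PySem.List.pyGet? mask p0.1).getD false && p0.2 != 0) = true := by
    simp only [Bool.and_eq_true, bne_iff_ne, ne_eq]
    exact ⟨hmask0, by omega⟩
  have hnpos : 0 < names.length := by
    by_contra hn
    have : names.length = 0 := by omega
    rw [this] at hlo0
    omega
  have hc0 : pvClass names.length p0.2 < names.length :=
    pv_class_lt _ _ hlo0 (by omega) (Or.inr hnpos)
  rw [parse_initial_words, pv_alt_eq,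
    (by apply List.ext_getElem <;> simp :
      names.map (fun _ => ([] : List Int))
        = (List.range names.length).map (fun _ => ([] : List Int))),
    pv_fold_buckets_gen mask names.length _ _ hlab] at heq
  have hcols := congrArg (fun l => l[pvClass names.length p0.2]?) heq
  simp only [List.getElem?_map, List.getElem?_range hc0, Option.map_some, Option.some.injEq,
    List.nil_append] at hcols
  have hlen := congrArg List.length hcols
  rw [List.length_filterMap_eq_countP, List.length_filterMap_eq_countP] at hlen
  simp only [pv_isSome_if] at hlen
  have hlt := pv_countP_lt
      (fun p => ((PySem.List.pyGet? mask p.1).getD false && p.2 != 0 && (pvClass names.length p.2 == pvClass names.length p0.2)))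
      (fun p => ((PySem.List.pyGet? mask p.1).getD false && p.2 != 0 && p.2 == ((pvClass names.length p0.2 : Nat) : Int)))
      (PySem.List.enumerate itc 0)
      (by
        intro q hq hQ
        simp only [Bool.and_eq_true, beq_iff_eq] at hQ ⊢
        obtain ⟨hgq, hq2⟩ := hQ
        refine ⟨hgq, ?_⟩
        rw [hq2]
        generalize pvClass names.length p0.2 = k
        simp [pvClass])
      p0 hp0
      (by simp [hg0])
      (by
        have hne : ¬ p0.2 = ((pvClass names.length p0.2 : Nat) : Int) := by omega
        simp [hne])
  omega
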